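-- pv_equiv track=rewrite | github.com/GillianGrayson/mlmg | source/python/Methylation/method/clustering/order.py | clustering_order
-- ===== SOURCE A (Python) =====
-- def clustering_order(clusters):
--     curr_cluster = clusters[0]
--     mod_cluster = 0
--     clusters_sorted = []
--     for cl_id in range(0, len(clusters)):
--         if clusters[cl_id] != curr_cluster:
--             curr_cluster = clusters[cl_id]
--             mod_cluster += 1
--         clusters_sorted.append(mod_cluster)
--     return  clusters_sorted
-- ===== SOURCE B (Python) =====
-- def clustering_order(clusters):
--     out = []
--     n = len(clusters)
--     i = 0
--     label = 0
--     while i < n: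
--         j = i + 1
--         while j < n and clusters[j] == clusters[i]:
--             j += 1
--         out.extend([label] * (j - i))
--         label += 1
--         i = j
--     return out
-- ===== Notes on version B (the rewrite author's own statement) =====
-- stated objective: alternative
-- what changed: B walks the list run by run with a two-index scan and extends the output with a block [label]*(run length) per run, instead of A's per-element compare-to-running-value loop; B returns [] on empty input where A raises.
-- crash fix: On the empty list A raises IndexError (clusters[0]); B returns []. — e.g. on clustering_order([]): A raises IndexError, B returns []
import Mathlib
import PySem

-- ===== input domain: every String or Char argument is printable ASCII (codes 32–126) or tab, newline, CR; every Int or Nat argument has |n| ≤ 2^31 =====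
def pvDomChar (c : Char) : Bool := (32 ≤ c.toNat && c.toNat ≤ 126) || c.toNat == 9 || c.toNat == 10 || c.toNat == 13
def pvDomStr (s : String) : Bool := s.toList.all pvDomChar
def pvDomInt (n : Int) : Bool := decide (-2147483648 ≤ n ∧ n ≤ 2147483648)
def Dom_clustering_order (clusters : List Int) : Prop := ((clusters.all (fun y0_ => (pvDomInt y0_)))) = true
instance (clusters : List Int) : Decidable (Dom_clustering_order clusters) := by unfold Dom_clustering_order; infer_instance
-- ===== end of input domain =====

-- B relabels consecutive runs by a two-index run scan (block per run) instead of A's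
-- per-element compare-to-running-value loop; same cost, different decomposition.
-- On the empty list A raises IndexError while B returns [].

-- ===== PORT A =====
-- per-element loop: track current cluster value and running label, append label each step
def clustering_order (clusters : List Int) : List Int :=
  match PySem.List.pyGet? clusters 0 with
  | none => []   -- Python: clusters[0] raises IndexError here; excluded by Pre_
  | some c0 =>
    ((PySem.List.pyRange 0 (clusters.length : Int) 1).foldl
      (fun (st : Int × Int × List Int) cl_id =>
        if PySem.List.pyGetD clusters cl_id 0 ≠ st.1 then
          (PySem.List.pyGetD clusters cl_id 0, st.2.1 + 1, st.2.2 ++ [st.2.1 + 1])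
        else (st.1, st.2.1, st.2.2 ++ [st.2.1]))
      (c0, 0, [])).2.2

-- ===== PORT B =====
-- run-by-run scan: the inner while (advance j over equal elements) is the takeWhile/dropWhile
-- split of the remaining list; each run contributes a block [label] * (run length)
def pvAltGo : Nat → List Int → Int → List Int
  | _, [], _ => []
  | 0, _ :: _, _ => []   -- fuel exhausted: unreachable when fuel ≥ list length
  | Nat.succ fuel, c :: rest, label =>
      let run := rest.takeWhile (fun x => x == c)
      let rest' := rest.dropWhile (fun x => x == c)
      List.replicate (run.length + 1) label ++ pvAltGo fuel rest' (label + 1)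

def clustering_order_alt (clusters : List Int) : List Int := pvAltGo clusters.length clusters 0

-- ===== PRECONDITION & SPEC =====
-- Pre_ excludes exactly the empty list, on which A raises IndexError (clusters[0]).
def Pre_clustering_order (clusters : List Int) : Prop := clusters ≠ []
instance (clusters : List Int) : Decidable (Pre_clustering_order clusters) := by
  unfold Pre_clustering_order; infer_instance

def pvWitness_clustering_order : List Int := [2, 2, 5, 3, 3]

-- On the empty list A raises IndexError (clusters[0]); B returns [].
def Raises_clustering_order (clusters : List Int) : Prop := clusters = []
instance (clusters : List Int) : Decidable (Raises_clustering_order clusters) := by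
  unfold Raises_clustering_order; infer_instance
def pvRaiseWitness_clustering_order : List Int := []
def pvRaiseWitnessOut_clustering_order : List Int := []

def Spec_clustering_order (clusters : List Int) (out : List Int) : Prop := out = clustering_order_alt clusters
instance (clusters : List Int) (out : List Int) : Decidable (Spec_clustering_order clusters out) := by unfold Spec_clustering_order; infer_instance

-- ===== CLAIM (what is proved, stated in full; the proofs are below) =====
def Claim_equal_clustering_order : Prop := ∀ (clusters : List Int), Dom_clustering_order clusters → Pre_clustering_order clusters → Spec_clustering_order clusters (clustering_order clusters)
def Claim_raises_clustering_order : Prop := (∀ (clusters : List Int), Dom_clustering_order clusters → Raises_clustering_order clusters → ¬ Pre_clustering_order clusters) ∧ (Dom_clustering_order (pvRaiseWitness_clustering_order) ∧ Raises_clustering_order (pvRaiseWitness_clustering_order) ∧ clustering_order_alt (pvRaiseWitness_clustering_order) = pvRaiseWitnessOut_clustering_order)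

-- ===== LEMMAS AND PROOFS =====

-- reference relabelling: emit the running label per element, bump it on a change
def pvG : Int → Int → List Int → List Int
  | _, _, [] => []
  | curr, mod, x :: xs => if x ≠ curr then (mod + 1) :: pvG x (mod + 1) xs else mod :: pvG curr mod xs

-- A's fold (with output accumulator) computes pvG
lemma pvFoldA_eq_g (xs : List Int) : ∀ (curr mod : Int) (acc : List Int),
    (xs.foldl
      (fun (st : Int × Int × List Int) x =>
        if x ≠ st.1 then (x, st.2.1 + 1, st.2.2 ++ [st.2.1 + 1])
        else (st.1, st.2.1, st.2.2 ++ [st.2.1]))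
      (curr, mod, acc)).2.2 = acc ++ pvG curr mod xs := by
  induction xs with
  | nil => intro curr mod acc; simp [pvG]
  | cons x xs ih =>
    intro curr mod acc
    simp only [List.foldl_cons]
    by_cases h : x = curr
    · rw [if_neg (by simp [h]), ih]
      simp [pvG, h]
    · rw [if_pos h, ih]
      simp [pvG, h]

-- pvG emits the leading run as a constant block, then bumps the label
lemma pvG_run (xs : List Int) : ∀ (curr mod : Int),
    pvG curr mod xs =
      List.replicate (xs.takeWhile (fun x => x == curr)).length mod ++
      (match xs.dropWhile (fun x => x == curr) with
       | [] => []
       | x :: xs' => (mod + 1) :: pvG x (mod + 1) xs') := by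
  induction xs with
  | nil => intro curr mod; simp [pvG]
  | cons x xs ih =>
    intro curr mod
    by_cases h : x = curr
    · simp [pvG, h, List.replicate_succ, ih]
    · simp [pvG, h]

-- B's run scan (with enough fuel) equals pvG (headed by the first label)
lemma pvAlt_eq_g : ∀ (n : Nat) (xs : List Int), xs.length ≤ n → ∀ (c label : Int),
    pvAltGo (n + 1) (c :: xs) label = label :: pvG c label xs := by
  intro n
  induction n with
  | zero =>
    intro xs hlen c label
    have : xs = [] := List.eq_nil_of_length_eq_zero (Nat.le_zero.mp hlen)
    subst this
    simp [pvAltGo, pvG]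
  | succ n ih =>
    intro xs hlen c label
    rw [pvAltGo]
    rw [pvG_run xs c label]
    simp only [List.replicate_succ, List.cons_append]
    congr 1
    congr 1
    cases hd : xs.dropWhile (fun x => x == c) with
    | nil => simp [pvAltGo]
    | cons y ys =>
      have hlen' : ys.length ≤ n := by
        have h1 : (xs.dropWhile (fun x => x == c)).length ≤ xs.length :=
          List.length_dropWhile_le _ _
        rw [hd] at h1
        simp only [List.length_cons] at h1
        omega
      exact ih ys hlen' y (label + 1)

-- ===== VERDICT (by name: the statement is the Claim_ definition above) =====
theorem clustering_order_spec : Claim_equal_clustering_order := by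
  intro clusters _ hpre
  unfold Spec_clustering_order clustering_order clustering_order_alt
  cases clusters with
  | nil => exact absurd rfl hpre
  | cons c0 rest =>
    have hget : PySem.List.pyGet? (c0 :: rest) (0 : Int) = some c0 := by
      simp [PySem.List.pyGet?, PySem.List.pyIdx?]
    simp only [hget]
    rw [PySem.List.foldl_pyRange_zero_pyGetD' (c0 :: rest) 0
      (fun (st : Int × Int × List Int) x =>
        if x ≠ st.1 then (x, st.2.1 + 1, st.2.2 ++ [st.2.1 + 1])
        else (st.1, st.2.1, st.2.2 ++ [st.2.1])) (c0, 0, [])]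
    rw [pvFoldA_eq_g]
    show pvG c0 0 (c0 :: rest) = pvAltGo (rest.length + 1) (c0 :: rest) 0
    rw [pvAlt_eq_g rest.length rest le_rfl c0 0]
    simp [pvG]

theorem clustering_order_raises : Claim_raises_clustering_order := by
  unfold Claim_raises_clustering_order
  constructor
  · intro clusters _ hr
    unfold Pre_clustering_order
    simp [Raises_clustering_order] at hr
    simp [hr]
  · decide

-- self-check: the raise-witness output stated in the claim is B's value there
theorem pvRaiseWitness_ok :
    clustering_order_alt pvRaiseWitness_clustering_order = pvRaiseWitnessOut_clustering_order :=
  clustering_order_raises.2.2.2
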